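-- pv_equiv track=rewrite | github.com/onlinefchen/auto-convert | download_rules.py | process_rule_content
-- ===== SOURCE A (Python) =====
-- def process_rule_content(content: str) -> str:
--     """Process rule content to fix formatting issues"""
--     lines = content.split('\n')
--     processed_lines = []
--
--     for line in lines:
--         # Comment out Sukka's signature line to avoid syntax errors
--         if 'th1s_rule5et_1s_m4d3_by_5ukk4w_ruleset.skk.moe' in line:
--             processed_lines.append('# ' + line)
--         else:
--             processed_lines.append(line)
--
--     return '\n'.join(processed_lines)
-- ===== SOURCE B (Python) =====
-- def process_rule_content(content: str) -> str:
--     """Process rule content to fix formatting issues (single char-level pass, no split/join of a line list)"""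
--     sig = 'th1s_rule5et_1s_m4d3_by_5ukk4w_ruleset.skk.moe'
--     pieces = []
--     cur = []
--     for ch in content:
--         if ch == '\n':
--             line = ''.join(cur)
--             if sig in line:
--                 pieces.append('# ')
--             pieces.append(line)
--             pieces.append('\n')
--             cur = []
--         else:
--             cur.append(ch)
--     line = ''.join(cur)
--     if sig in line:
--         pieces.append('# ')
--     pieces.append(line)
--     return ''.join(pieces)
-- ===== Notes on version B (the rewrite author's own statement) =====
-- stated objective: alternative
-- what changed: Replaces the split-on-newline / per-line loop / join pipeline with a single character-level pass that accumulates the current line in a buffer and emits the (possibly '# '-prefixed) line and its newline as it goes, never materialising a list of lines.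
import Mathlib
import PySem

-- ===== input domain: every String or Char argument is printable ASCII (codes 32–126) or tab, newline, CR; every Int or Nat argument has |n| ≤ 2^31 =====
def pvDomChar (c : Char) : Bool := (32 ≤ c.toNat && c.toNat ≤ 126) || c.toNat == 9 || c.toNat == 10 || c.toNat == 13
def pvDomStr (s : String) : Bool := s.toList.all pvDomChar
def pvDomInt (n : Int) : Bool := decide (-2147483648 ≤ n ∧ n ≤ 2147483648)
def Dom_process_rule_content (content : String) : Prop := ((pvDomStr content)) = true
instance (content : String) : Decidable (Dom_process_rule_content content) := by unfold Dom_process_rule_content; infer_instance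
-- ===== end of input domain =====

-- B replaces the split-on-newline + per-line loop + join pipeline by one character-level pass with a line buffer; same O(n) cost (objective: alternative).


-- Sukka's signature substring (the literal both Pythons test with 'in')
def pvSig : List Char := "th1s_rule5et_1s_m4d3_by_5ukk4w_ruleset.skk.moe".toList

-- ===== PORT A =====
-- split content on the newline character; per line append '# ' + line or line; join with newline  (strings ported as List Char)
def process_rule_content (content : String) : String :=
  let lines := PySem.Chars.splitOn content.toList ['\n']
  let processed := lines.foldl (fun acc line =>
    if PySem.Chars.isIn pvSig line then acc ++ [['#', ' '] ++ line] else acc ++ [line]) []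
  String.ofList (PySem.Chars.join ['\n'] processed)

-- ===== PORT B =====
-- one pass over the characters; st.2 is the current-line buffer cur, st.1 the pieces emitted so far
-- (Source B's final ''.join(pieces) over string pieces is ported as direct List Char concatenation — exact: joining with the empty separator is concatenation)
def process_rule_content_alt (content : String) : String :=
  let step := fun (st : List Char × List Char) (ch : Char) =>
    if ch = '\n' then
      (st.1 ++ (if PySem.Chars.isIn pvSig st.2 then ['#', ' '] else []) ++ st.2 ++ ['\n'], [])
    else (st.1, st.2 ++ [ch])
  let st := content.toList.foldl step ([], [])
  String.ofList (st.1 ++ (if PySem.Chars.isIn pvSig st.2 then ['#', ' '] else []) ++ st.2)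

-- ===== PRECONDITION & SPEC =====
def Spec_process_rule_content (content : String) (out : String) : Prop := out = process_rule_content_alt content
instance (content : String) (out : String) : Decidable (Spec_process_rule_content content out) := by unfold Spec_process_rule_content; infer_instance

-- ===== CLAIM (what is proved, stated in full; the proofs are below) =====
def Claim_equal_process_rule_content : Prop := ∀ (content : String), Dom_process_rule_content content → Spec_process_rule_content content (process_rule_content content)

-- ===== LEMMAS AND PROOFS =====

-- per-line processing (shared shape of A's two branches)
def pvF (line : List Char) : List Char :=
  if PySem.Chars.isIn pvSig line then ['#', ' '] ++ line else line

-- prepend a prefix onto the first block of a block list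
def pvMapHead (p : List Char) : List (List Char) → List (List Char)
  | [] => [p]
  | h :: t => (p ++ h) :: t

-- structural specification of splitting on the newline character
def pvSplitNl : List Char → List (List Char)
  | [] => [[]]
  | c :: r => if c = '\n' then [] :: pvSplitNl r else pvMapHead [c] (pvSplitNl r)

lemma pvSplitNl_ne_nil (s : List Char) : pvSplitNl s ≠ [] := by
  cases s with
  | nil => simp [pvSplitNl]
  | cons c r =>
    simp only [pvSplitNl]
    split
    · simp
    · cases h : pvSplitNl r <;> simp [pvMapHead]

lemma pv_go_spec (fuel : Nat) : ∀ (l cur : List Char) (accs : List (List Char)),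
    l.length < fuel →
    PySem.Chars.splitOn.go ['\n'] fuel l cur accs = accs.reverse ++ pvMapHead cur.reverse (pvSplitNl l) := by
  induction fuel with
  | zero => intro l cur accs h; omega
  | succ f ih =>
    intro l cur accs h
    cases l with
    | nil => simp [PySem.Chars.splitOn.go, pvSplitNl, pvMapHead]
    | cons c rest =>
      rw [PySem.Chars.splitOn.go]
      by_cases hc : c = '\n'
      · subst hc
        have hp : List.isPrefixOf ['\n'] ('\n' :: rest) = true := by simp [List.isPrefixOf]
        rw [if_pos hp]
        rw [ih _ _ _ (by simpa using Nat.lt_of_succ_lt_succ h)]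
        simp only [pvSplitNl]
        cases hs : pvSplitNl rest with
        | nil => exact absurd hs (pvSplitNl_ne_nil rest)
        | cons a t => simp [hs, pvMapHead]
      · have hp : List.isPrefixOf ['\n'] (c :: rest) = false := by
          simp [List.isPrefixOf]; exact fun hh => hc hh.symm
        rw [if_neg (by simp [hp])]
        rw [ih _ _ _ (by simpa using Nat.lt_of_succ_lt_succ h)]
        simp only [pvSplitNl, if_neg hc]
        cases hs : pvSplitNl rest with
        | nil => simp [pvMapHead]
        | cons a t => simp [pvMapHead]

lemma pv_splitOn_eq (s : List Char) : PySem.Chars.splitOn s ['\n'] = pvSplitNl s := by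
  rw [PySem.Chars.splitOn, pv_go_spec (s.length + 1) s [] [] (by omega)]
  cases hs : pvSplitNl s with
  | nil => exact absurd hs (pvSplitNl_ne_nil s)
  | cons a t => simp [pvMapHead]

lemma pv_foldA (lines : List (List Char)) (acc : List (List Char)) :
    lines.foldl (fun acc line =>
      if PySem.Chars.isIn pvSig line then acc ++ [['#', ' '] ++ line] else acc ++ [line]) acc
      = acc ++ lines.map pvF := by
  induction lines generalizing acc with
  | nil => simp
  | cons h t ih =>
    simp only [List.foldl_cons, List.map_cons, pvF]
    split <;> rw [ih] <;> simp

lemma pv_loopB (s : List Char) : ∀ (pieces cur : List Char),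
    (let st := s.foldl (fun (st : List Char × List Char) (ch : Char) =>
        if ch = '\n' then
          (st.1 ++ (if PySem.Chars.isIn pvSig st.2 then ['#', ' '] else []) ++ st.2 ++ ['\n'], [])
        else (st.1, st.2 ++ [ch])) (pieces, cur);
      st.1 ++ (if PySem.Chars.isIn pvSig st.2 then ['#', ' '] else []) ++ st.2)
    = pieces ++ PySem.Chars.join ['\n'] ((pvMapHead cur (pvSplitNl s)).map pvF) := by
  induction s with
  | nil =>
    intro pieces cur
    simp only [List.foldl_nil, pvSplitNl, pvMapHead, List.append_nil, List.map_cons, List.map_nil,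
      PySem.Chars.join_singleton, pvF]
    split <;> simp
  | cons c r ih =>
    intro pieces cur
    simp only [List.foldl_cons]
    by_cases hc : c = '\n'
    · subst hc
      rw [if_pos rfl]
      have h := ih (pieces ++ (if PySem.Chars.isIn pvSig cur then ['#', ' '] else []) ++ cur ++ ['\n']) []
      simp only at h ⊢
      rw [h]
      simp only [pvSplitNl]
      cases hs : pvSplitNl r with
      | nil => exact absurd hs (pvSplitNl_ne_nil r)
      | cons a t =>
        simp only [if_true, pvMapHead, List.nil_append, List.append_nil, List.map_cons]
        rw [PySem.Chars.join_cons_cons]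
        have hf : (if PySem.Chars.isIn pvSig cur then ['#', ' '] else []) ++ cur = pvF cur := by
          simp only [pvF]; split <;> simp
        rw [← hf]
        simp [List.append_assoc]
    · rw [if_neg hc]
      have h := ih pieces (cur ++ [c])
      simp only at h ⊢
      rw [h]
      simp only [pvSplitNl, if_neg hc]
      cases hs : pvSplitNl r with
      | nil => exact absurd hs (pvSplitNl_ne_nil r)
      | cons a t => simp [pvMapHead]

-- ===== VERDICT (by name: the statement is the Claim_ definition above) =====
theorem process_rule_content_spec : Claim_equal_process_rule_content := by
  intro content _
  unfold Spec_process_rule_content process_rule_content process_rule_content_alt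
  dsimp only
  rw [pv_splitOn_eq, pv_foldA]
  have h := pv_loopB content.toList [] []
  simp only at h ⊢
  rw [h]
  have hmh : pvMapHead [] (pvSplitNl content.toList) = pvSplitNl content.toList := by
    cases hs : pvSplitNl content.toList with
    | nil => exact absurd hs (pvSplitNl_ne_nil _)
    | cons a t => simp [pvMapHead]
  rw [hmh]
  simp
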